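-- pv_equiv track=rewrite | github.com/kh-byeon/h_rag | llm_generator_eval.py | group_retrieval_by_sweep_idx
-- ===== SOURCE A (Python) =====
-- from typing import Any, Dict, List, Optional, Tuple
--
-- def group_retrieval_by_sweep_idx(
--     records: List[Dict[str, Any]],
-- ) -> Dict[int, List[Dict[str, Any]]]:
--     g: Dict[int, List[Dict[str, Any]]] = {}
--     for r in records:
--         sid = int(r.get("sweep_idx", -1))
--         if sid < 0:
--             continue
--         g.setdefault(sid, []).append(r)
--     for sid in g:
--         g[sid].sort(key=lambda x: int(x.get("query_idx", 0)))
--     return dict(sorted(g.items()))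
-- ===== SOURCE B (Python) =====
-- def group_retrieval_by_sweep_idx(records):
--     sids = sorted({int(r.get("sweep_idx", -1)) for r in records if int(r.get("sweep_idx", -1)) >= 0})
--     return {
--         s: sorted((r for r in records if int(r.get("sweep_idx", -1)) == s),
--                   key=lambda x: int(x.get("query_idx", 0)))
--         for s in sids
--     }
-- ===== Notes on version B (the rewrite author's own statement) =====
-- stated objective: alternative
-- what changed: A accumulates a dict via setdefault/append, sorts each bucket in place and re-sorts the items; B computes the sorted set of valid sweep ids once and builds each group directly by filtering the records per id and sorting it, with no mutable dict accumulation.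
import Mathlib
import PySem

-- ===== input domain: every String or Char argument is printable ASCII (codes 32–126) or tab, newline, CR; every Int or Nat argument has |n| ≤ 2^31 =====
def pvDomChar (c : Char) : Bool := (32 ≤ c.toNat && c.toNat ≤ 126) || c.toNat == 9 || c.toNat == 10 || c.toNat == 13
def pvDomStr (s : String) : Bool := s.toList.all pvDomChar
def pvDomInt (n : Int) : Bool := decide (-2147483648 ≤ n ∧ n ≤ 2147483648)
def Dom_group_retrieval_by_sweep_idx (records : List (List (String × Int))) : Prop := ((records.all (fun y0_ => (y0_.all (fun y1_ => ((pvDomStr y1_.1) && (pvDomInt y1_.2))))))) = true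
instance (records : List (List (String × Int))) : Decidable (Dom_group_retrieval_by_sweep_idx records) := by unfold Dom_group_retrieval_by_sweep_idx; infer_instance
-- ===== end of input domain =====

-- B groups by computing the sorted set of valid sweep ids once and filtering the records per id,
-- instead of A's mutable dict accumulation with per-bucket in-place sorts and a final item sort
-- (alternative decomposition, same return value; neither side mutates its argument).

-- shared field lookups: both Pythons contain the same 'int(r.get(..., d))' expressions (values are Int, so int() is the identity)
def pvSweep (r : List (String × Int)) : Int := (PySem.Dict.mk r).getD "sweep_idx" (-1)
def pvQuery (r : List (String × Int)) : Int := (PySem.Dict.mk r).getD "query_idx" 0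

-- ===== PORT A =====
def group_retrieval_by_sweep_idx (records : List (List (String × Int))) : List (Int × List (List (String × Int))) :=
  -- g.setdefault(sid, []).append(r)  ≡  g[sid] = g.get(sid, []) + [r] with position preserved: Dict.modify
  let g : PySem.Dict Int (List (List (String × Int))) :=
    records.foldl (fun g r =>
      let sid := pvSweep r
      if sid < 0 then g else g.modify sid [] (· ++ [r])) PySem.Dict.empty
  -- for sid in g: g[sid].sort(key=...)  — each stored list sorted in place, keys and order unchanged
  let items2 := g.items.map (fun p => (p.1, PySem.List.sorted p.2 pvQuery))
  -- dict(sorted(g.items())): dict keys are distinct, so Python's tuple comparison here is exactly comparison by the first component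
  PySem.List.sorted items2 (fun p => p.1)

-- ===== PORT B =====
def group_retrieval_by_sweep_idx_alt (records : List (List (String × Int))) : List (Int × List (List (String × Int))) :=
  -- sorted({int(r.get("sweep_idx", -1)) for r in records if int(r.get("sweep_idx", -1)) >= 0})  — sorted() of a set without key: order-safe
  let sids := PySem.List.sorted (PySem.Set.ofList ((records.filter (fun r => 0 ≤ pvSweep r)).map pvSweep)) (fun x => x) false
  -- {s: sorted((r for r in records if sid(r) == s), key=query_idx) for s in sids}
  sids.map (fun s => (s, PySem.List.sorted (records.filter (fun r => pvSweep r == s)) pvQuery))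

-- ===== PRECONDITION & SPEC =====
def Spec_group_retrieval_by_sweep_idx (records : List (List (String × Int))) (out : List (Int × List (List (String × Int)))) : Prop := out = group_retrieval_by_sweep_idx_alt records
instance (records : List (List (String × Int))) (out : List (Int × List (List (String × Int)))) : Decidable (Spec_group_retrieval_by_sweep_idx records out) := by unfold Spec_group_retrieval_by_sweep_idx; infer_instance

-- ===== CLAIM (what is proved, stated in full; the proofs are below) =====
def Claim_equal_group_retrieval_by_sweep_idx : Prop := ∀ (records : List (List (String × Int))), Dom_group_retrieval_by_sweep_idx records → Spec_group_retrieval_by_sweep_idx records (group_retrieval_by_sweep_idx records)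

-- ===== LEMMAS AND PROOFS =====

-- a fold that skips elements failing p is the fold over the filtered list
theorem pv_foldl_if_skip {α β : Type} (p : α → Bool) (f : β → α → β) (l : List α) (init : β) :
    l.foldl (fun acc x => if p x then f acc x else acc) init = (l.filter p).foldl f init := by
  induction l generalizing init with
  | nil => rfl
  | cons x t ih => by_cases h : p x <;> simp [h, ih]

-- for a nonnegative target id, filtering by "sweep_idx == s" ignores the sid ≥ 0 pre-filter
theorem pv_filter_eq_of_nonneg (records : List (List (String × Int))) (s : Int) (hs : 0 ≤ s) :
    records.filter (fun r => pvSweep r == s) =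
      (records.filter (fun r => 0 ≤ pvSweep r)).filter (fun r => pvSweep r == s) := by
  rw [List.filter_filter]
  apply List.filter_congr
  intro r _
  by_cases h : pvSweep r = s <;> simp [h] <;> omega

-- sorting key-tagged pairs by their (distinct) key = tagging the sorted keys
theorem pv_sorted_map_pair {β : Type} (xs : List Int) (val : Int → β) :
    PySem.List.sorted ((PySem.Set.ofList xs).map (fun k => (k, val k))) (fun p => p.1) false =
      (PySem.List.sorted (PySem.Set.ofList xs) (fun x => x) false).map (fun k => (k, val k)) := by
  apply PySem.List.sorted_eq_of_perm_of_pairwise_lt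
  · exact (PySem.List.sorted_perm _ _ _).map _
  · exact List.pairwise_map.mpr (PySem.List.sorted_ofList_pairwise_lt xs)

theorem pv_main (records : List (List (String × Int))) :
    group_retrieval_by_sweep_idx records = group_retrieval_by_sweep_idx_alt records := by
  unfold group_retrieval_by_sweep_idx group_retrieval_by_sweep_idx_alt
  dsimp only
  set F := records.filter (fun r => 0 ≤ pvSweep r) with hF
  set P := F.map (fun r => (pvSweep r, r)) with hP
  have hfold :
      records.foldl (fun g r =>
        let sid := pvSweep r
        if sid < 0 then g else g.modify sid [] (· ++ [r])) PySem.Dict.empty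
        = P.foldl (fun d p => d.modify p.1 [] (· ++ [p.2])) PySem.Dict.empty := by
    rw [hP, List.foldl_map, hF, ← pv_foldl_if_skip (fun r => 0 ≤ pvSweep r)]
    congr 1
    funext g r
    by_cases h : pvSweep r < 0
    · simp [h, Int.not_le.mpr h]
    · simp [h, Int.not_lt.mp h]
  rw [hfold]
  set g := P.foldl (fun d p => d.modify p.1 [] (· ++ [p.2])) PySem.Dict.empty with hg
  have hnd : g.keys.Nodup := by
    rw [hg]
    exact PySem.Dict.nodup_keys_foldl_modify_key P (fun p => p.1) [] (fun _ p => (· ++ [p.2])) _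
      PySem.Dict.nodup_keys_empty
  have hkeys : g.keys = PySem.Set.ofList (F.map pvSweep) := by
    rw [hg]
    rw [PySem.Dict.keys_foldl_modify_key P (fun p => p.1) [] (fun _ p => (· ++ [p.2]))]
    simp [hP, List.map_map, PySem.Set.update_nil_left, Function.comp_def]
  have hgetD : ∀ k : Int, g.getD k [] = F.filter (fun r => pvSweep r == k) := by
    intro k
    rw [hg, PySem.Dict.getD_foldl_modify_append P PySem.Dict.empty k]
    simp [hP, List.filter_map, List.map_map, Function.comp_def]
  have hitems : g.items = g.keys.map (fun k => (k, g.getD k [])) :=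
    PySem.Dict.items_eq_map_keys g hnd []
  rw [hitems, hkeys, List.map_map]
  have : ((fun p : Int × List (List (String × Int)) => (p.1, PySem.List.sorted p.2 pvQuery)) ∘
      fun k => (k, g.getD k [])) = fun k => (k, PySem.List.sorted (F.filter (fun r => pvSweep r == k)) pvQuery) := by
    funext k; simp [Function.comp, hgetD k]
  rw [this, pv_sorted_map_pair (F.map pvSweep) (fun k => PySem.List.sorted (F.filter (fun r => pvSweep r == k)) pvQuery)]
  apply List.map_congr_left
  intro s hs
  have hs0 : 0 ≤ s := by
    have : s ∈ F.map pvSweep := by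
      have := (PySem.List.mem_sorted (xs := PySem.Set.ofList (F.map pvSweep)) (key := fun x => x) (rev := false) (x := s)).mp hs
      exact (PySem.Set.mem_ofList _ _).mp this
    obtain ⟨r, hr, hrs⟩ := List.mem_map.mp this
    have := List.of_mem_filter hr
    simp at this; omega
  rw [pv_filter_eq_of_nonneg records s hs0, ← hF]

-- ===== VERDICT (by name: the statement is the Claim_ definition above) =====
theorem group_retrieval_by_sweep_idx_spec : Claim_equal_group_retrieval_by_sweep_idx := by
  intro records _
  exact pv_main records
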